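-- pv_equiv track=rewrite | github.com/Apocalipse15/TAPS_P2 | main_code.py | check_if_same_country_or_alliance
-- ===== SOURCE A (Python) =====
-- def check_if_same_country_or_alliance(node1, node2, alliances):
--     country1 = node1.get("country")
--     country2 = node2.get("country")
--
--     if country1 == country2:
--         return True
--
--     for alliance in alliances:
--         if country1 in alliance.get("countries", []) and country2 in alliance.get("countries", []):
--             return True
--
--     return False
-- ===== SOURCE B (Python) =====
-- def check_if_same_country_or_alliance(node1, node2, alliances):
--     country1 = node1.get("country")
--     country2 = node2.get("country")
--     if country1 == country2:
--         return True
--     allies1 = set()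
--     for alliance in alliances:
--         cs = alliance.get("countries", [])
--         if country1 in cs:
--             allies1.update(cs)
--     return country2 in allies1
-- ===== Notes on version B (the rewrite author's own statement) =====
-- stated objective: alternative
-- what changed: B builds a set of all countries allied with country1 in one fold and finishes with a single membership test for country2, instead of A's per-alliance two-membership conjunction with early return.
import Mathlib
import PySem

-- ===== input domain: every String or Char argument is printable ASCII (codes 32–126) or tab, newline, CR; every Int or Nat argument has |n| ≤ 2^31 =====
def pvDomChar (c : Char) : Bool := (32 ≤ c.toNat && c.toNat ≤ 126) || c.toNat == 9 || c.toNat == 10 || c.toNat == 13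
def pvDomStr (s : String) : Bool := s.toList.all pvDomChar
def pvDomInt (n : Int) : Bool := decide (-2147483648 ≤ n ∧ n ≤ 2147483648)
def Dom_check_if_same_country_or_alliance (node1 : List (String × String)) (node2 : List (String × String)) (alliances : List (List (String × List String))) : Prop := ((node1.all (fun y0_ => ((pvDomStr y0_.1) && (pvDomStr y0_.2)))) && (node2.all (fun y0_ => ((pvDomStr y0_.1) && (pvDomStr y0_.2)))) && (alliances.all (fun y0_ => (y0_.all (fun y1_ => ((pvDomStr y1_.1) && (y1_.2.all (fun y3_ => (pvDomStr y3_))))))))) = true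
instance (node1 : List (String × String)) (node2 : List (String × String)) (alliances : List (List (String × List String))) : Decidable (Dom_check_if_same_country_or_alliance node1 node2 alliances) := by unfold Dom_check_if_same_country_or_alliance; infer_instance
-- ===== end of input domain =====

-- B: alternative decomposition — builds the set of country1 allies in one fold, then a single membership test for country2 (same asymptotic cost).


-- ===== PORT A =====
-- Python "x in list" where x is node.get("country") (an Option String): None is never in a list of str
def pyOptIn (o : Option String) (l : List String) : Bool :=
  match o with
  | none => false
  | some x => l.contains x

-- A's for-loop with early return
def checkLoopA (c1 c2 : Option String) : List (List (String × List String)) → Bool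
  | [] => false
  | a :: rest =>
    if pyOptIn c1 (PySem.Dict.getD ⟨a⟩ "countries" []) && pyOptIn c2 (PySem.Dict.getD ⟨a⟩ "countries" []) then true
    else checkLoopA c1 c2 rest

def check_if_same_country_or_alliance (node1 : List (String × String)) (node2 : List (String × String)) (alliances : List (List (String × List String))) : Bool :=
  let country1 := PySem.Dict.get? ⟨node1⟩ "country"
  let country2 := PySem.Dict.get? ⟨node2⟩ "country"
  if country1 == country2 then true
  else checkLoopA country1 country2 alliances

-- ===== PORT B =====
-- B: one fold collecting the set of countries allied with country1, then one membership test
def check_if_same_country_or_alliance_alt (node1 : List (String × String)) (node2 : List (String × String)) (alliances : List (List (String × List String))) : Bool :=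
  let country1 := PySem.Dict.get? ⟨node1⟩ "country"
  let country2 := PySem.Dict.get? ⟨node2⟩ "country"
  if country1 == country2 then true
  else
    let allies1 : PySem.Set String := alliances.foldl (fun s a =>
      let cs := PySem.Dict.getD ⟨a⟩ "countries" []
      if pyOptIn country1 cs then PySem.Set.update s cs else s) PySem.Set.empty
    pyOptIn country2 allies1

-- ===== PRECONDITION & SPEC =====
def Spec_check_if_same_country_or_alliance (node1 : List (String × String)) (node2 : List (String × String)) (alliances : List (List (String × List String))) (out : Bool) : Prop := out = check_if_same_country_or_alliance_alt node1 node2 alliances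
instance (node1 : List (String × String)) (node2 : List (String × String)) (alliances : List (List (String × List String))) (out : Bool) : Decidable (Spec_check_if_same_country_or_alliance node1 node2 alliances out) := by unfold Spec_check_if_same_country_or_alliance; infer_instance

-- ===== CLAIM (what is proved, stated in full; the proofs are below) =====
def Claim_equal_check_if_same_country_or_alliance : Prop := ∀ (node1 : List (String × String)) (node2 : List (String × String)) (alliances : List (List (String × List String))), Dom_check_if_same_country_or_alliance node1 node2 alliances → Spec_check_if_same_country_or_alliance node1 node2 alliances (check_if_same_country_or_alliance node1 node2 alliances)

-- ===== LEMMAS AND PROOFS =====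

theorem pyOptIn_update (c : Option String) (s : PySem.Set String) (cs : List String) :
    pyOptIn c (PySem.Set.update s cs) = (pyOptIn c s || pyOptIn c cs) := by
  cases c with
  | none => rfl
  | some x =>
    simp only [pyOptIn]
    cases h : (PySem.Set.update s cs).contains x <;>
      cases h1 : s.contains x <;> cases h2 : cs.contains x <;>
        simp_all [PySem.Set.mem_update]

theorem fold_loop (c1 c2 : Option String) (l : List (List (String × List String))) (s : PySem.Set String) :
    pyOptIn c2 (l.foldl (fun s a =>
      let cs := PySem.Dict.getD ⟨a⟩ "countries" []
      if pyOptIn c1 cs then PySem.Set.update s cs else s) s)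
      = (pyOptIn c2 s || checkLoopA c1 c2 l) := by
  induction l generalizing s with
  | nil => simp [checkLoopA]
  | cons a rest ih =>
    simp only [List.foldl_cons, checkLoopA]
    by_cases h1 : pyOptIn c1 (PySem.Dict.getD ⟨a⟩ "countries" []) = true
    · rw [if_pos h1, ih, pyOptIn_update]
      by_cases h2 : pyOptIn c2 (PySem.Dict.getD ⟨a⟩ "countries" []) = true <;>
        simp [h1, h2]
    · rw [if_neg h1, ih]
      simp [h1]

-- ===== VERDICT (by name: the statement is the Claim_ definition above) =====
theorem check_if_same_country_or_alliance_spec : Claim_equal_check_if_same_country_or_alliance := by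
  intro node1 node2 alliances _
  unfold Spec_check_if_same_country_or_alliance
  unfold check_if_same_country_or_alliance check_if_same_country_or_alliance_alt
  by_cases h : (PySem.Dict.get? ⟨node1⟩ "country" == PySem.Dict.get? ⟨node2⟩ "country") = true
  · simp [h]
  · have he : pyOptIn (PySem.Dict.get? ⟨node2⟩ "country") PySem.Set.empty = false := by
      cases PySem.Dict.get? ⟨node2⟩ "country" <;> rfl
    simp only [h, if_false, Bool.false_eq_true, fold_loop, he, Bool.false_or]
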